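-- pv_equiv track=rewrite | github.com/filipaldi/glyphs_tools | svg-importer-main/svgImporter.glyphsPlugin/Contents/Resources/svg_import_html.py | extract_svgs_from_html
-- ===== SOURCE A (Python) =====
-- def extract_svgs_from_html(html_content):
--     svgs = []
--     pos = 0
--
--     while pos < len(html_content):
--         start_tag = html_content.find('<svg', pos)
--         if start_tag == -1:
--             break
--
--         end_tag = html_content.find('</svg>', start_tag)
--         if end_tag == -1:
--             break
--
--         end_tag += len('</svg>')
--
--         svg_content = html_content[start_tag:end_tag]
--         svgs.append(svg_content)
--
--         pos = end_tag
--
--     return svgs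
-- ===== SOURCE B (Python) =====
-- import re
--
-- def extract_svgs_from_html(html_content):
--     return re.findall(r'<svg.*?</svg>', html_content, re.DOTALL)
-- ===== Notes on version B (the rewrite author's own statement) =====
-- stated objective: idiomatic
-- what changed: The manual while-loop with absolute find positions and slice bookkeeping is replaced by a single regex pass, re.findall(r'<svg.*?</svg>', html_content, re.DOTALL), whose non-greedy left-to-right matching reproduces the same blocks.
import Mathlib
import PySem

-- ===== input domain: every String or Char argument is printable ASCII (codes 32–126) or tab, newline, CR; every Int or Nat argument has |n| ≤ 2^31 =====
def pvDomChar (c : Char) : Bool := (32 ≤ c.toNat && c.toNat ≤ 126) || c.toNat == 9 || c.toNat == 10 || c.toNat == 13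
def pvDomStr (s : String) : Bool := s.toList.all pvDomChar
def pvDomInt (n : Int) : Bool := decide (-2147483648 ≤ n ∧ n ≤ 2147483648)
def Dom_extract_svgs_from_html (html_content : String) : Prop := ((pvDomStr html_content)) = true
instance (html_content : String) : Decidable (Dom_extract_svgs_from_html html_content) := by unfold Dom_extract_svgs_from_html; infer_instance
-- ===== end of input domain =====

-- B replaces A's manual find/advance loop by one idiomatic regex pass (re.findall, non-greedy, DOTALL); same cost, same values.

-- ===== PORT A =====
-- A's while-loop: pos advances past each extracted block; strings are carried as char lists
-- and wrapped with String.ofList at the end (Python slices of str are str).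
def pvLoopA (s : List Char) (pos : Nat) (svgs : List (List Char)) : List (List Char) :=
  if _h : pos < s.length then
    let start_tag := PySem.Chars.findFrom s ['<', 's', 'v', 'g'] (pos : Int)
    if hst : start_tag = -1 then svgs
    else
      let end_tag := PySem.Chars.findFrom s ['<', '/', 's', 'v', 'g', '>'] start_tag
      if hen : end_tag = -1 then svgs
      else
        -- end_tag += len('</svg>'); svg_content = html_content[start_tag:end_tag]; pos = end_tag
        pvLoopA s (end_tag + 6).toNat
          (svgs ++ [PySem.Chars.slice s (some start_tag) (some (end_tag + 6))])
  else svgs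
termination_by s.length - pos
decreasing_by
  have hpos4 : pos ≤ s.length := le_of_lt _h
  obtain ⟨hle, hpre, -⟩ :=
    PySem.Chars.findFrom_natCast_spec s ['<', 's', 'v', 'g'] pos hpos4 hst
  set st := PySem.Chars.findFrom s ['<', 's', 'v', 'g'] (pos : Int)  
  have hstnn : (0:Int) ≤ st := le_trans (by exact_mod_cast Nat.zero_le pos) hle
  have hstlen : st.toNat ≤ s.length := by
    have := hpre.length_le
    simp [List.length_drop] at this
    omega
  have hcast : ((st.toNat : Nat) : Int) = st := Int.toNat_of_nonneg hstnn
  have hen' : PySem.Chars.findFrom s ['<', '/', 's', 'v', 'g', '>'] ((st.toNat : Nat) : Int) ≠ -1 := by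
    rw [hcast]; exact hen
  obtain ⟨hle2, -, -⟩ :=
    PySem.Chars.findFrom_natCast_spec s ['<', '/', 's', 'v', 'g', '>'] st.toNat hstlen hen'
  rw [hcast] at hle2
  omega

def extract_svgs_from_html (html_content : String) : List String :=
  (pvLoopA html_content.toList 0 []).map String.ofList

-- ===== PORT B =====
-- Hand port of re.findall(r'<svg.*?</svg>', t, re.DOTALL) for this fixed pattern (no regex
-- library in Lean): the engine scans left to right, so a match starts at the leftmost position
-- carrying the literal prefix '<svg' (PySem.Chars.find), the lazy '.*?' stops at the first
-- following '</svg>' (search starts after the 4 prefix chars), and the scan resumes at the match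
-- end.  When the leftmost '<svg' has no '</svg>' after it, no later position can match either
-- (its closing tag would also follow the earlier '<svg'), so the engine yields nothing more.
def pvFindall (t : List Char) : List (List Char) :=
  if hi : PySem.Chars.find t ['<', 's', 'v', 'g'] = -1 then []
  else
    let u := t.drop (PySem.Chars.find t ['<', 's', 'v', 'g']).toNat
    if hj : PySem.Chars.findFrom u ['<', '/', 's', 'v', 'g', '>'] 4 = -1 then []
    else
      u.take ((PySem.Chars.findFrom u ['<', '/', 's', 'v', 'g', '>'] 4).toNat + 6) ::
        pvFindall (u.drop ((PySem.Chars.findFrom u ['<', '/', 's', 'v', 'g', '>'] 4).toNat + 6))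
termination_by t.length
decreasing_by
  have hinf : ['<', 's', 'v', 'g'] <:+: t := by
    by_contra hni
    exact hi ((PySem.Chars.find_eq_neg_one_iff t ['<', 's', 'v', 'g']).mpr hni)
  have hlen4 : 4 ≤ t.length := by simpa using hinf.length_le
  simp only [List.length_drop]
  omega

def extract_svgs_from_html_alt (html_content : String) : List String :=
  (pvFindall html_content.toList).map String.ofList

-- ===== PRECONDITION & SPEC =====
def Spec_extract_svgs_from_html (html_content : String) (out : List String) : Prop := out = extract_svgs_from_html_alt html_content
instance (html_content : String) (out : List String) : Decidable (Spec_extract_svgs_from_html html_content out) := by unfold Spec_extract_svgs_from_html; infer_instance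

-- ===== CLAIM (what is proved, stated in full; the proofs are below) =====
def Claim_equal_extract_svgs_from_html : Prop := ∀ (html_content : String), Dom_extract_svgs_from_html html_content → Spec_extract_svgs_from_html html_content (extract_svgs_from_html html_content)

-- ===== LEMMAS AND PROOFS =====

-- No occurrence of '</svg>' can start inside the 4 leading characters '<svg'.
lemma pvNoEarlyClose (w : List Char) (j : Nat) (hj : j < 4) :
    ¬ (['<', '/', 's', 'v', 'g', '>'] <+: (['<', 's', 'v', 'g'] ++ w).drop j) := by
  interval_cases j <;> simp [List.cons_prefix_cons]

-- '</svg>' occurs in '<svg' ++ w iff it occurs in w.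
lemma pvInfixClose_iff (w : List Char) :
    (['<', '/', 's', 'v', 'g', '>'] <:+: (['<', 's', 'v', 'g'] ++ w)) ↔
      (['<', '/', 's', 'v', 'g', '>'] <:+: w) := by
  constructor
  · intro h
    obtain ⟨j, hj⟩ := (PySem.Chars.exists_prefix_drop_iff_isIn _ _).mpr
      ((PySem.Chars.isIn_iff_infix _ _).mpr h)
    by_cases h4 : j < 4
    · exact absurd hj (pvNoEarlyClose w j h4)
    · have hdrop : (['<', 's', 'v', 'g'] ++ w).drop j = w.drop (j - 4) := by
        have hj4 : j = 4 + (j - 4) := by omega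
        rw [hj4, ← List.drop_drop]
        simp
      rw [hdrop] at hj
      obtain ⟨r, hr⟩ := hj
      exact ⟨w.take (j - 4), r, by rw [List.append_assoc, hr]; exact List.take_append_drop _ _⟩
  · intro h
    obtain ⟨a, b, hab⟩ := h
    exact ⟨['<', 's', 'v', 'g'] ++ a, b, by simp [hab]⟩

-- The first '</svg>' in '<svg' ++ w sits 4 characters after the first one in w.
lemma pvFindClose_shift (w : List Char)
    (h : PySem.Chars.find w ['<', '/', 's', 'v', 'g', '>'] ≠ -1) :
    PySem.Chars.find (['<', 's', 'v', 'g'] ++ w) ['<', '/', 's', 'v', 'g', '>'] =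
      4 + PySem.Chars.find w ['<', '/', 's', 'v', 'g', '>'] := by
  set B := ['<', '/', 's', 'v', 'g', '>'] with hB
  have hwnn : 0 ≤ PySem.Chars.find w B := by
    have := PySem.Chars.neg_one_le_find w B
    omega
  have hq : PySem.Chars.find (['<', 's', 'v', 'g'] ++ w) B ≠ -1 := by
    rw [Ne, PySem.Chars.find_eq_neg_one_iff, pvInfixClose_iff, ← PySem.Chars.find_eq_neg_one_iff]
    exact h
  have hqnn : 0 ≤ PySem.Chars.find (['<', 's', 'v', 'g'] ++ w) B := by
    have := PySem.Chars.neg_one_le_find (['<', 's', 'v', 'g'] ++ w) B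
    omega
  obtain ⟨hqpre, hqmin⟩ := PySem.Chars.find_spec (s := ['<', 's', 'v', 'g'] ++ w) (sub := B) hqnn
  obtain ⟨hwpre, hwmin⟩ := PySem.Chars.find_spec (s := w) (sub := B) hwnn
  set q := (PySem.Chars.find (['<', 's', 'v', 'g'] ++ w) B).toNat with hqdef
  set p := (PySem.Chars.find w B).toNat with hpdef
  have hq4 : 4 ≤ q := by
    by_contra hlt
    exact pvNoEarlyClose w q (by omega) hqpre
  -- upper bound: an occurrence at 4 + p forces q ≤ 4 + p
  have hup : q ≤ 4 + p := by
    by_contra hgt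
    have hocc : B <+: (['<', 's', 'v', 'g'] ++ w).drop (4 + p) := by
      have : (['<', 's', 'v', 'g'] ++ w).drop (4 + p) = w.drop p := by
        rw [← List.drop_drop]; simp
      rw [this]; exact hwpre
    exact hqmin (4 + p) (by omega) hocc
  -- lower bound: the occurrence at q gives one at q - 4 in w, so p ≤ q - 4
  have hlo : p ≤ q - 4 := by
    have hocc : B <+: w.drop (q - 4) := by
      have : (['<', 's', 'v', 'g'] ++ w).drop q = w.drop (q - 4) := by
        have hq' : q = 4 + (q - 4) := by omega
        rw [hq', ← List.drop_drop]; simp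
      rwa [this] at hqpre
    by_contra hgt
    exact hwmin (q - 4) (by omega) hocc
  have : q = 4 + p := by omega
  omega

-- B's lazy-body search (from offset 4) equals A's search from the '<svg' position itself.
lemma pvFindFrom4_eq_find (u : List Char) (hpre : ['<', 's', 'v', 'g'] <+: u) :
    PySem.Chars.findFrom u ['<', '/', 's', 'v', 'g', '>'] 4 =
      PySem.Chars.find u ['<', '/', 's', 'v', 'g', '>'] := by
  obtain ⟨w, rfl⟩ := hpre
  have hlen : 4 ≤ (['<', 's', 'v', 'g'] ++ w).length := by simp
  have hdrop4 : (['<', 's', 'v', 'g'] ++ w).drop 4 = w := by simp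
  have h4 : ((4 : Nat) : Int) = (4 : Int) := by norm_num
  rw [← h4, PySem.Chars.findFrom_natCast _ _ 4 hlen, hdrop4]
  by_cases hw : PySem.Chars.find w ['<', '/', 's', 'v', 'g', '>'] = -1
  · rw [if_pos hw]
    rw [eq_comm, PySem.Chars.find_eq_neg_one_iff, pvInfixClose_iff,
      ← PySem.Chars.find_eq_neg_one_iff]
    exact hw
  · rw [if_neg hw, pvFindClose_shift w hw]
    norm_num

-- Main loop invariant: A's loop from position pos produces exactly the regex matches of the
-- suffix s.drop pos, appended to the accumulator.
lemma pvLoopA_eq_findall (n : Nat) :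
    ∀ (s : List Char) (pos : Nat) (acc : List (List Char)), s.length - pos ≤ n →
      pvLoopA s pos acc = acc ++ pvFindall (s.drop pos) := by
  induction n with
  | zero =>
    intro s pos acc hn
    have hge : ¬ pos < s.length := by omega
    rw [pvLoopA.eq_def, dif_neg hge]
    have : s.drop pos = [] := List.drop_eq_nil_of_le (by omega)
    have hnil : pvFindall [] = [] := by
      rw [pvFindall.eq_def, dif_pos (by decide)]
    rw [this, hnil, List.append_nil]
  | succ n ih =>
    intro s pos acc hn
    by_cases hlt : pos < s.length
    · have hpos : pos ≤ s.length := le_of_lt hlt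
      rw [pvLoopA.eq_def, dif_pos hlt]
      simp only
      rw [PySem.Chars.findFrom_natCast s ['<', 's', 'v', 'g'] pos hpos]
      by_cases hfa : PySem.Chars.find (s.drop pos) ['<', 's', 'v', 'g'] = -1
      · rw [if_pos hfa, dif_pos rfl, pvFindall.eq_def, dif_pos hfa]
        simp
      · have hstne : ¬ ((pos : Int) + PySem.Chars.find (s.drop pos) ['<', 's', 'v', 'g'] = -1) := by
          have := PySem.Chars.neg_one_le_find (s.drop pos) ['<', 's', 'v', 'g']
          intro hcon; omega
        rw [if_neg hfa, dif_neg hstne]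
        have hinn : 0 ≤ PySem.Chars.find (s.drop pos) ['<', 's', 'v', 'g'] := by
          have := PySem.Chars.neg_one_le_find (s.drop pos) ['<', 's', 'v', 'g']
          omega
        set i := (PySem.Chars.find (s.drop pos) ['<', 's', 'v', 'g']).toNat with hidef
        have hicast : ((i : Nat) : Int) = PySem.Chars.find (s.drop pos) ['<', 's', 'v', 'g'] :=
          Int.toNat_of_nonneg hinn
        obtain ⟨hipre, -⟩ := PySem.Chars.find_spec (s := s.drop pos) (sub := ['<', 's', 'v', 'g']) hinn
        rw [List.drop_drop] at hipre
        -- the start tag, as a Nat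
        have hstcast : (↑pos + PySem.Chars.find (s.drop pos) ['<', 's', 'v', 'g']) = ((pos + i : Nat) : Int) := by
          push_cast
          omega
        set u := s.drop (pos + i) with hudef
        have hulen4 : 4 ≤ u.length := by simpa using hipre.length_le
        have hstlen : pos + i ≤ s.length := by
          have := hipre.length_le
          simp [hudef, List.length_drop] at this ⊢
          omega
        rw [hstcast, PySem.Chars.findFrom_natCast s ['<', '/', 's', 'v', 'g', '>'] (pos + i) hstlen]
        rw [← hudef]
        have hshift := pvFindFrom4_eq_find u hipre
        by_cases hfc : PySem.Chars.find u ['<', '/', 's', 'v', 'g', '>'] = -1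
        · rw [if_pos hfc, dif_pos rfl, pvFindall.eq_def, dif_neg hfa]
          simp only [← hidef]
          rw [List.drop_drop, ← hudef, dif_pos (by rw [hshift]; exact hfc)]
          simp
        · have hjnn : 0 ≤ PySem.Chars.find u ['<', '/', 's', 'v', 'g', '>'] := by
            have := PySem.Chars.neg_one_le_find u ['<', '/', 's', 'v', 'g', '>']
            omega
          set j := (PySem.Chars.find u ['<', '/', 's', 'v', 'g', '>']).toNat with hjdef
          have hjcast : ((j : Nat) : Int) = PySem.Chars.find u ['<', '/', 's', 'v', 'g', '>'] :=
            Int.toNat_of_nonneg hjnn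
          have henne : ¬ (((pos + i : Nat) : Int) + PySem.Chars.find u ['<', '/', 's', 'v', 'g', '>'] = -1) := by
            have := PySem.Chars.neg_one_le_find u ['<', '/', 's', 'v', 'g', '>']
            intro hcon; omega
          rw [if_neg hfc, dif_neg henne]
          -- the slice html_content[start_tag:end_tag+6] is u.take (j + 6)
          have hslice : PySem.Chars.slice s (some ((pos + i : Nat) : Int))
              (some (((pos + i : Nat) : Int) + PySem.Chars.find u ['<', '/', 's', 'v', 'g', '>'] + 6)) =
              u.take (j + 6) := by
            rw [PySem.Chars.slice_eq_listSlice,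
              PySem.List.slice_toNat s (by positivity) (by omega), ← hjcast, hudef]
            congr 1
            omega
          have hnewpos : ((((pos + i : Nat) : Int) + PySem.Chars.find u ['<', '/', 's', 'v', 'g', '>'] + 6)).toNat
              = pos + i + (j + 6) := by omega
          rw [hslice, hnewpos]
          have hdec : s.length - (pos + i + (j + 6)) ≤ n := by omega
          rw [ih s (pos + i + (j + 6)) (acc ++ [u.take (j + 6)]) hdec]
          -- unfold pvFindall on the right
          conv_rhs => rw [pvFindall.eq_def]
          rw [dif_neg hfa]
          simp only [← hidef]
          rw [List.drop_drop, ← hudef, dif_neg (by rw [hshift]; exact hfc), hshift, ← hjdef]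
          have hdd : List.drop (j + 6) u = List.drop (pos + i + (j + 6)) s := by
            rw [hudef, List.drop_drop]
          rw [hdd]
          simp
    · rw [pvLoopA.eq_def, dif_neg hlt]
      have : s.drop pos = [] := List.drop_eq_nil_of_le (by omega)
      have hnil : pvFindall [] = [] := by
        rw [pvFindall.eq_def, dif_pos (by decide)]
      rw [this, hnil, List.append_nil]

-- ===== VERDICT (by name: the statement is the Claim_ definition above) =====
theorem extract_svgs_from_html_spec : Claim_equal_extract_svgs_from_html := by
  intro html_content _
  unfold Spec_extract_svgs_from_html extract_svgs_from_html extract_svgs_from_html_alt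
  rw [pvLoopA_eq_findall html_content.toList.length html_content.toList 0 [] (by omega)]
  simp
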